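-- pv_equiv track=rewrite | github.com/romeorizzi/TALight | example_problems/tutorial/game_path_in_graph/bots/graph_game_lib.py | get_nodes_from_edges
-- ===== SOURCE A (Python) =====
-- def get_nodes_from_edges(edges):
--     e_nodes=[]
--     for edge in edges:
--         u,v=edge
--         e_nodes.append(u)
--         e_nodes.append(v)
--     e_nodes=list(set(e_nodes))
--     return sorted(e_nodes)
-- ===== SOURCE B (Python) =====
-- def _insert_unique(nodes, x):
--     i = 0
--     while i < len(nodes) and nodes[i] < x:
--         i += 1
--     if i == len(nodes) or nodes[i] != x:
--         nodes.insert(i, x)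
--
-- def get_nodes_from_edges(edges):
--     nodes = []
--     for u, v in edges:
--         _insert_unique(nodes, u)
--         _insert_unique(nodes, v)
--     return nodes
-- ===== Notes on version B (the rewrite author's own statement) =====
-- stated objective: alternative
-- what changed: Maintains a sorted duplicate-free node list incrementally, inserting each endpoint at its sorted position as edges are scanned, instead of A's hash-set deduplication followed by a final sort.
import Mathlib
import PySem

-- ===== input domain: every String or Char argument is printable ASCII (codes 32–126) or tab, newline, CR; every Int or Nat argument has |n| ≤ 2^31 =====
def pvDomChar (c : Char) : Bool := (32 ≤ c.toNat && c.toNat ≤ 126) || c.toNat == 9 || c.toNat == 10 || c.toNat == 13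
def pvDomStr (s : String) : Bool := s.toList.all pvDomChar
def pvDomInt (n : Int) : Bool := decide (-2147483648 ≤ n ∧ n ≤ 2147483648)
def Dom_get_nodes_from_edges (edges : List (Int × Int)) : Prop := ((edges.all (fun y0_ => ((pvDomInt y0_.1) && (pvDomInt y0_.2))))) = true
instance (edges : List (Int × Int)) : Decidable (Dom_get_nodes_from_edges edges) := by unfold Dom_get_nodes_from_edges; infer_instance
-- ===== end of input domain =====

-- B keeps the node list sorted and duplicate-free at all times, inserting each endpoint
-- at its sorted position while scanning the edges once, instead of A's hash-set
-- deduplication followed by a final sort.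

-- ===== PORT A =====
def get_nodes_from_edges (edges : List (Int × Int)) : List Int :=
  let e_nodes : List Int := edges.foldl (fun acc edge => (acc ++ [edge.1]) ++ [edge.2]) []
  let e_nodes := PySem.Set.ofList e_nodes
  PySem.List.sorted e_nodes (fun x => x) false

-- ===== PORT B =====
-- _insert_unique: the while-loop scan past elements < x becomes structural recursion;
-- at the stop point, x is inserted unless it is already present.
def insertUnique (x : Int) : List Int → List Int
  | [] => [x]
  | y :: ys => if y < x then y :: insertUnique x ys
               else if y ≠ x then x :: y :: ys else y :: ys

def get_nodes_from_edges_alt (edges : List (Int × Int)) : List Int :=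
  edges.foldl (fun nodes e => insertUnique e.2 (insertUnique e.1 nodes)) []

-- ===== PRECONDITION & SPEC =====
def Spec_get_nodes_from_edges (edges : List (Int × Int)) (out : List Int) : Prop := out = get_nodes_from_edges_alt edges
instance (edges : List (Int × Int)) (out : List Int) : Decidable (Spec_get_nodes_from_edges edges out) := by unfold Spec_get_nodes_from_edges; infer_instance

-- ===== CLAIM (what is proved, stated in full; the proofs are below) =====
def Claim_equal_get_nodes_from_edges : Prop := ∀ (edges : List (Int × Int)), Dom_get_nodes_from_edges edges → Spec_get_nodes_from_edges edges (get_nodes_from_edges edges)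

-- ===== LEMMAS AND PROOFS =====

theorem mem_insertUnique (x z : Int) (l : List Int) :
    z ∈ insertUnique x l ↔ z = x ∨ z ∈ l := by
  induction l with
  | nil => simp [insertUnique]
  | cons y ys ih =>
    by_cases h1 : y < x
    · simp only [insertUnique, if_pos h1, List.mem_cons, ih]; tauto
    · by_cases h2 : y = x
      · subst h2
        simp only [insertUnique, lt_irrefl, if_false, ne_eq, not_true_eq_false,
          List.mem_cons]; tauto
      · simp only [insertUnique, if_neg h1, ne_eq, h2, not_false_eq_true, if_true,
          List.mem_cons]

theorem pairwise_insertUnique (x : Int) (l : List Int) (hl : l.Pairwise (· < ·)) :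
    (insertUnique x l).Pairwise (· < ·) := by
  induction l with
  | nil => simp [insertUnique]
  | cons y ys ih =>
    rcases List.pairwise_cons.mp hl with ⟨hy, hys⟩
    by_cases h1 : y < x
    · simp only [insertUnique, if_pos h1]
      refine List.pairwise_cons.mpr ⟨?_, ih hys⟩
      intro z hz
      rcases (mem_insertUnique x z ys).mp hz with rfl | hzys
      · exact h1
      · exact hy z hzys
    · by_cases h2 : y = x
      · subst h2
        simpa only [insertUnique, lt_irrefl, if_false, ne_eq, not_true_eq_false] using hl
      · have hxy : x < y := lt_of_le_of_ne (not_lt.mp h1) (Ne.symm h2)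
        simp only [insertUnique, if_neg h1, ne_eq, h2, not_false_eq_true, if_true]
        refine List.pairwise_cons.mpr ⟨?_, hl⟩
        intro z hz
        rcases List.mem_cons.mp hz with rfl | hzys
        · exact hxy
        · exact lt_trans hxy (hy z hzys)

-- B's fold: strictly increasing invariant
theorem pairwise_foldB (edges : List (Int × Int)) :
    ∀ ns : List Int, ns.Pairwise (· < ·) →
      (edges.foldl (fun nodes e => insertUnique e.2 (insertUnique e.1 nodes)) ns).Pairwise (· < ·) := by
  induction edges with
  | nil => intro ns h; simpa using h
  | cons e es ih =>
    intro ns h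
    exact ih _ (pairwise_insertUnique e.2 _ (pairwise_insertUnique e.1 ns h))

-- B's fold: membership = accumulator ∪ endpoints
theorem mem_foldB (edges : List (Int × Int)) :
    ∀ (ns : List Int) (z : Int),
      z ∈ edges.foldl (fun nodes e => insertUnique e.2 (insertUnique e.1 nodes)) ns
        ↔ z ∈ ns ∨ ∃ e ∈ edges, z = e.1 ∨ z = e.2 := by
  induction edges with
  | nil => intro ns z; simp
  | cons e es ih =>
    intro ns z
    rw [List.foldl_cons, ih, mem_insertUnique, mem_insertUnique]
    simp only [List.exists_mem_cons_iff]
    generalize (∃ x ∈ es, z = x.1 ∨ z = x.2) = P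
    tauto

-- A's endpoint list: membership
theorem mem_foldA (edges : List (Int × Int)) :
    ∀ (acc : List Int) (z : Int),
      z ∈ edges.foldl (fun acc edge => (acc ++ [edge.1]) ++ [edge.2]) acc
        ↔ z ∈ acc ∨ ∃ e ∈ edges, z = e.1 ∨ z = e.2 := by
  induction edges with
  | nil => intro acc z; simp
  | cons e es ih =>
    intro acc z
    rw [List.foldl_cons, ih]
    simp only [List.mem_append, List.mem_singleton, List.exists_mem_cons_iff]
    generalize (∃ x ∈ es, z = x.1 ∨ z = x.2) = P
    tauto

-- ===== VERDICT (by name: the statement is the Claim_ definition above) =====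
theorem get_nodes_from_edges_spec : Claim_equal_get_nodes_from_edges := by
  intro edges _
  unfold Spec_get_nodes_from_edges get_nodes_from_edges get_nodes_from_edges_alt
  set L := edges.foldl (fun acc edge => (acc ++ [edge.1]) ++ [edge.2]) ([] : List Int) with hL
  set b := edges.foldl (fun nodes e => insertUnique e.2 (insertUnique e.1 nodes)) ([] : List Int) with hb
  have hpw : b.Pairwise (· < ·) := pairwise_foldB edges [] (by simp)
  have hbnd : b.Nodup := hpw.imp (fun h => ne_of_lt h)
  have hsnd : (PySem.Set.ofList L).Nodup := PySem.Set.nodup_ofList L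
  have hperm : b.Perm (PySem.Set.ofList L) := by
    rw [List.perm_ext_iff_of_nodup hbnd hsnd]
    intro z
    rw [PySem.Set.mem_ofList L z, hL, mem_foldA edges [] z, hb, mem_foldB edges [] z]
  exact PySem.List.sorted_eq_of_perm_of_pairwise_lt (PySem.Set.ofList L) b (fun x => x) hperm hpw
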